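-- pv_equiv track=rewrite | github.com/wchang88/Taiwanese_ASR_MT | MT/score.py | split_data_by_len
-- ===== SOURCE A (Python) =====
-- from collections import defaultdict
--
-- def getSentLen(sent):
--     return len(sent.split())
--
-- def split_data_by_len(hyps, refs, srcs):
--     hyps_dict, refs_dict, srcs_dict = defaultdict(list), defaultdict(list), defaultdict(list)
--     for src, hyp, ref in zip(srcs, hyps, refs):
--         src_sent_len = getSentLen(src)
--         if src_sent_len <= 5:
--             hyps_dict["5"].append(hyp)
--             srcs_dict["5"].append(src)
--             refs_dict["5"].append(ref)
--         elif src_sent_len <=10: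
--             hyps_dict["10"].append(hyp)
--             srcs_dict["10"].append(src)
--             refs_dict["10"].append(ref)
--         elif src_sent_len <=15:
--             hyps_dict["15"].append(hyp)
--             srcs_dict["15"].append(src)
--             refs_dict["15"].append(ref)
--         elif src_sent_len <=20:
--             hyps_dict["20"].append(hyp)
--             srcs_dict["20"].append(src)
--             refs_dict["20"].append(ref)
--         elif src_sent_len <=30:
--             hyps_dict["30"].append(hyp)
--             srcs_dict["30"].append(src)
--             refs_dict["30"].append(ref)
--         else:
--             hyps_dict["30+"].append(hyp)
--             srcs_dict["30+"].append(src)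
--             refs_dict["30+"].append(ref)
--
--     return hyps_dict, refs_dict, srcs_dict
-- ===== SOURCE B (Python) =====
-- # B: staged grouping — label every sentence once, then build each bucket's
-- # value lists wholesale by filtering per first-seen label (no incremental appends).
-- from collections import defaultdict
--
-- _THRESHOLDS = [5, 10, 15, 20, 30]
-- _LABELS = ["5", "10", "15", "20", "30", "30+"]
--
--
-- def split_data_by_len(hyps, refs, srcs):
--     labeled = [(_LABELS[sum(t < len(s.split()) for t in _THRESHOLDS)], h, r, s)
--                for s, h, r in zip(srcs, hyps, refs)]
--     hyps_dict, refs_dict, srcs_dict = defaultdict(list), defaultdict(list), defaultdict(list)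
--     for k in dict.fromkeys(l for l, _, _, _ in labeled):
--         hyps_dict[k] = [h for l, h, _, _ in labeled if l == k]
--         refs_dict[k] = [r for l, _, r, _ in labeled if l == k]
--         srcs_dict[k] = [s for l, _, _, s in labeled if l == k]
--     return hyps_dict, refs_dict, srcs_dict
-- ===== Notes on version B (the rewrite author's own statement) =====
-- stated objective: alternative
-- what changed: A appends src/hyp/ref into three dicts incrementally inside a six-branch if/elif chain; B stages the work: it first labels every sentence once (a threshold count indexed into a label table), then builds each bucket's three value lists wholesale by filtering the labeled list per first-seen label and assigns them to the dicts.
import Mathlib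
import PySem

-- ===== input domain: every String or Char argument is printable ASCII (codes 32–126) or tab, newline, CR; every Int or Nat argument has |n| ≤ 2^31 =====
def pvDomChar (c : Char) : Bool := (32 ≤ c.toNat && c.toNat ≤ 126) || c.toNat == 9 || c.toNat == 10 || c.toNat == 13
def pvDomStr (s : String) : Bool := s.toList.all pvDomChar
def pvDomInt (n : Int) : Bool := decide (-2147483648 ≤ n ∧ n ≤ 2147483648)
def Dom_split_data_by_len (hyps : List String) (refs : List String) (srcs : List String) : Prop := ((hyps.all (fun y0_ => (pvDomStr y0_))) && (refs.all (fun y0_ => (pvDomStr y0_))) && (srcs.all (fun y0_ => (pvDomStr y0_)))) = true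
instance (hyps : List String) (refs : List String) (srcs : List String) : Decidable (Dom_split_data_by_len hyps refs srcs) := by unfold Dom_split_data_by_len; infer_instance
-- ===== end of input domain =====

-- B replaces A's incremental six-branch append loop with a staged grouping (label pass, then
-- per-label filtering); objective: alternative decomposition, same asymptotic cost.

-- ===== PORT A =====
def getSentLen (sent : String) : Int :=
  ((PySem.Str.split₀ sent).length : Int)

def split_data_by_len (hyps : List String) (refs : List String) (srcs : List String) : (List (String × List String)) × (List (String × List String)) × (List (String × List String)) :=
  let fin := (srcs.zip (hyps.zip refs)).foldl (fun st t =>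
    let src := t.1
    let hyp := t.2.1
    let ref := t.2.2
    let n := getSentLen src
    if n ≤ 5 then
      (st.1.modify "5" [] (· ++ [hyp]), st.2.1.modify "5" [] (· ++ [ref]), st.2.2.modify "5" [] (· ++ [src]))
    else if n ≤ 10 then
      (st.1.modify "10" [] (· ++ [hyp]), st.2.1.modify "10" [] (· ++ [ref]), st.2.2.modify "10" [] (· ++ [src]))
    else if n ≤ 15 then
      (st.1.modify "15" [] (· ++ [hyp]), st.2.1.modify "15" [] (· ++ [ref]), st.2.2.modify "15" [] (· ++ [src]))
    else if n ≤ 20 then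
      (st.1.modify "20" [] (· ++ [hyp]), st.2.1.modify "20" [] (· ++ [ref]), st.2.2.modify "20" [] (· ++ [src]))
    else if n ≤ 30 then
      (st.1.modify "30" [] (· ++ [hyp]), st.2.1.modify "30" [] (· ++ [ref]), st.2.2.modify "30" [] (· ++ [src]))
    else
      (st.1.modify "30+" [] (· ++ [hyp]), st.2.1.modify "30+" [] (· ++ [ref]), st.2.2.modify "30+" [] (· ++ [src])))
    ((PySem.Dict.empty : PySem.Dict String (List String)), (PySem.Dict.empty : PySem.Dict String (List String)), (PySem.Dict.empty : PySem.Dict String (List String)))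
  (fin.1.items, fin.2.1.items, fin.2.2.items)

-- ===== PORT B =====
def pvThresholds : List Int := [5, 10, 15, 20, 30]
def pvLabels : List String := ["5", "10", "15", "20", "30", "30+"]

-- _LABELS[sum(t < n for t in _THRESHOLDS)]; the 0/1-sum is List.countP, and the
-- index is always < 6 so List.getD's default is never used (exact here).
def pvLabel (n : Int) : String :=
  pvLabels.getD (pvThresholds.countP (fun t => decide (t < n))) ""

def split_data_by_len_alt (hyps : List String) (refs : List String) (srcs : List String) : (List (String × List String)) × (List (String × List String)) × (List (String × List String)) :=
  let labeled := (srcs.zip (hyps.zip refs)).map (fun t =>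
    (pvLabel ((PySem.Str.split₀ t.1).length : Int), t.2.1, t.2.2, t.1))
  -- dict.fromkeys over the labels = ordered dedup
  let keys := PySem.List.dedup (labeled.map (fun q => q.1))
  let hyps_dict := keys.foldl (fun d k =>
    d.insert k ((labeled.filter (fun q => q.1 == k)).map (fun q => q.2.1)))
    (PySem.Dict.empty : PySem.Dict String (List String))
  let refs_dict := keys.foldl (fun d k =>
    d.insert k ((labeled.filter (fun q => q.1 == k)).map (fun q => q.2.2.1)))
    (PySem.Dict.empty : PySem.Dict String (List String))
  let srcs_dict := keys.foldl (fun d k =>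
    d.insert k ((labeled.filter (fun q => q.1 == k)).map (fun q => q.2.2.2)))
    (PySem.Dict.empty : PySem.Dict String (List String))
  (hyps_dict.items, refs_dict.items, srcs_dict.items)

-- ===== PRECONDITION & SPEC =====
def Spec_split_data_by_len (hyps : List String) (refs : List String) (srcs : List String) (out : (List (String × List String)) × (List (String × List String)) × (List (String × List String))) : Prop := out = split_data_by_len_alt hyps refs srcs
instance (hyps : List String) (refs : List String) (srcs : List String) (out : (List (String × List String)) × (List (String × List String)) × (List (String × List String))) : Decidable (Spec_split_data_by_len hyps refs srcs out) := by unfold Spec_split_data_by_len; infer_instance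

-- ===== CLAIM (what is proved, stated in full; the proofs are below) =====
def Claim_equal_split_data_by_len : Prop := ∀ (hyps : List String) (refs : List String) (srcs : List String), Dom_split_data_by_len hyps refs srcs → Spec_split_data_by_len hyps refs srcs (split_data_by_len hyps refs srcs)

-- ===== LEMMAS AND PROOFS =====

-- B's table lookup computes the same label as A's if/elif chain.
theorem pvLabel_eq (n : Int) :
    pvLabel n = if n ≤ 5 then "5" else if n ≤ 10 then "10" else if n ≤ 15 then "15"
      else if n ≤ 20 then "20" else if n ≤ 30 then "30" else "30+" := by
  unfold pvLabel pvThresholds pvLabels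
  split_ifs with h1 h2 h3 h4 h5 <;>
    simp_all [List.countP_cons, List.countP_nil] <;>
    split_ifs <;> first | rfl | omega

-- A's fold over a triple of dicts is the triple of the component folds.
theorem foldl_prod3 {α β γ δ : Type} (f1 : α → δ → α) (f2 : β → δ → β) (f3 : γ → δ → γ)
    (l : List δ) (a : α) (b : β) (c : γ) :
    l.foldl (fun st t => (f1 st.1 t, f2 st.2.1 t, f3 st.2.2 t)) (a, b, c) =
      (l.foldl f1 a, l.foldl f2 b, l.foldl f3 c) := by
  induction l generalizing a b c with
  | nil => rfl
  | cons x xs ih => simpa using ih (f1 a x) (f2 b x) (f3 c x)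

-- The items of an append-into-buckets modify loop: first-seen key order, values by filtering.
theorem modify_fold_items {δ : Type} (l : List δ) (key : δ → String) (val : δ → String) :
    (l.foldl (fun d t => d.modify (key t) [] (· ++ [val t]))
        (PySem.Dict.empty : PySem.Dict String (List String))).items
      = (PySem.List.dedup (l.map key)).map
          (fun k => (k, (l.filter (fun t => key t == k)).map val)) := by
  have h0 : (l.foldl (fun d t => d.modify (key t) [] (· ++ [val t]))
        (PySem.Dict.empty : PySem.Dict String (List String)))
      = ((l.map (fun t => (key t, val t))).foldl
          (fun d p => d.modify p.1 [] (· ++ [p.2]))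
          (PySem.Dict.empty : PySem.Dict String (List String))) := by
    rw [List.foldl_map]
  rw [h0]
  have hnd : (((l.map (fun t => (key t, val t))).foldl
      (fun d p => d.modify p.1 [] (· ++ [p.2]))
      (PySem.Dict.empty : PySem.Dict String (List String)))).keys.Nodup :=
    PySem.Dict.nodup_keys_foldl_modify_key _ Prod.fst [] (fun _ p => (· ++ [p.2])) _
      (by simp [PySem.Dict.keys_empty])
  rw [PySem.Dict.items_eq_map_keys _ hnd []]
  rw [PySem.Dict.keys_foldl_modify_key _ Prod.fst [] (fun _ p => (· ++ [p.2]))]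
  rw [PySem.Dict.keys_empty, PySem.Set.update_nil_left, ← PySem.List.dedup_eq_ofList]
  have hgetD : ∀ k, (((l.map (fun t => (key t, val t))).foldl
      (fun d p => d.modify p.1 [] (· ++ [p.2]))
      (PySem.Dict.empty : PySem.Dict String (List String)))).getD k []
      = (l.filter (fun t => key t == k)).map val := by
    intro k
    rw [PySem.Dict.getD_foldl_modify_append, PySem.Dict.getD_empty]
    simp [List.filter_map, List.map_map, Function.comp_def]
  simp only [hgetD, List.map_map, Function.comp_def]

-- ===== VERDICT (by name: the statement is the Claim_ definition above) =====
-- A's per-sentence bucket key, factored out for the proof.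
def keyA (t : String × String × String) : String :=
  if getSentLen t.1 ≤ 5 then "5" else if getSentLen t.1 ≤ 10 then "10"
  else if getSentLen t.1 ≤ 15 then "15" else if getSentLen t.1 ≤ 20 then "20"
  else if getSentLen t.1 ≤ 30 then "30" else "30+"

theorem split_data_by_len_spec : Claim_equal_split_data_by_len := by
  intro hyps refs srcs _
  unfold Spec_split_data_by_len
  simp only [split_data_by_len, split_data_by_len_alt]
  have hstep : (fun (st : PySem.Dict String (List String) × PySem.Dict String (List String) × PySem.Dict String (List String)) (t : String × String × String) =>
      let src := t.1; let hyp := t.2.1; let ref := t.2.2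
      let n := getSentLen src
      if n ≤ 5 then
        (st.1.modify "5" [] (· ++ [hyp]), st.2.1.modify "5" [] (· ++ [ref]), st.2.2.modify "5" [] (· ++ [src]))
      else if n ≤ 10 then
        (st.1.modify "10" [] (· ++ [hyp]), st.2.1.modify "10" [] (· ++ [ref]), st.2.2.modify "10" [] (· ++ [src]))
      else if n ≤ 15 then
        (st.1.modify "15" [] (· ++ [hyp]), st.2.1.modify "15" [] (· ++ [ref]), st.2.2.modify "15" [] (· ++ [src]))
      else if n ≤ 20 then
        (st.1.modify "20" [] (· ++ [hyp]), st.2.1.modify "20" [] (· ++ [ref]), st.2.2.modify "20" [] (· ++ [src]))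
      else if n ≤ 30 then
        (st.1.modify "30" [] (· ++ [hyp]), st.2.1.modify "30" [] (· ++ [ref]), st.2.2.modify "30" [] (· ++ [src]))
      else
        (st.1.modify "30+" [] (· ++ [hyp]), st.2.1.modify "30+" [] (· ++ [ref]), st.2.2.modify "30+" [] (· ++ [src])))
    = (fun st t => (st.1.modify (keyA t) [] (· ++ [t.2.1]),
        st.2.1.modify (keyA t) [] (· ++ [t.2.2]),
        st.2.2.modify (keyA t) [] (· ++ [t.1]))) := by
    funext st t
    simp only [keyA]
    split_ifs <;> rfl
  have hA : (srcs.zip (hyps.zip refs)).foldl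
      (fun (st : PySem.Dict String (List String) × PySem.Dict String (List String) × PySem.Dict String (List String)) t =>
        (st.1.modify (keyA t) [] (· ++ [t.2.1]), st.2.1.modify (keyA t) [] (· ++ [t.2.2]),
          st.2.2.modify (keyA t) [] (· ++ [t.1])))
      (PySem.Dict.empty, PySem.Dict.empty, PySem.Dict.empty)
    = ((srcs.zip (hyps.zip refs)).foldl (fun d t => d.modify (keyA t) [] (· ++ [t.2.1])) PySem.Dict.empty,
       (srcs.zip (hyps.zip refs)).foldl (fun d t => d.modify (keyA t) [] (· ++ [t.2.2])) PySem.Dict.empty,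
       (srcs.zip (hyps.zip refs)).foldl (fun d t => d.modify (keyA t) [] (· ++ [t.1])) PySem.Dict.empty) :=
    foldl_prod3
      (fun (d : PySem.Dict String (List String)) (t : String × String × String) => d.modify (keyA t) [] (· ++ [t.2.1]))
      (fun (d : PySem.Dict String (List String)) (t : String × String × String) => d.modify (keyA t) [] (· ++ [t.2.2]))
      (fun (d : PySem.Dict String (List String)) (t : String × String × String) => d.modify (keyA t) [] (· ++ [t.1])) _ _ _ _
  rw [hstep, hA]
  rw [modify_fold_items _ keyA (fun t => t.2.1),
      modify_fold_items _ keyA (fun t => t.2.2),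
      modify_fold_items _ keyA (fun t => t.1)]
  have hkey : ∀ (t : String × String × String),
      pvLabel ((PySem.Str.split₀ t.1).length : Int) = keyA t := by
    intro t
    rw [pvLabel_eq]
    rfl
  simp only [List.map_map, Function.comp_def, List.filter_map, hkey]
  have hfresh : ∀ a ∈ PySem.List.dedup (List.map keyA (srcs.zip (hyps.zip refs))),
      (PySem.Dict.empty : PySem.Dict String (List String)).contains a = false :=
    fun a _ => PySem.Dict.contains_empty a
  have hnodup : (List.map (fun x => x) (PySem.List.dedup (List.map keyA (srcs.zip (hyps.zip refs))))).Nodup := by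
    rw [List.map_id']
    exact PySem.List.nodup_dedup (List.map keyA (srcs.zip (hyps.zip refs)))
  rw [PySem.Dict.items_foldl_insert_fresh _ (fun x => x) _ _ hfresh hnodup,
      PySem.Dict.items_foldl_insert_fresh _ (fun x => x) _ _ hfresh hnodup,
      PySem.Dict.items_foldl_insert_fresh _ (fun x => x) _ _ hfresh hnodup]
  rfl
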